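-- pv_equiv track=rewrite | github.com/IBM/superglue-mtl | data_utils.py | _get_token_ids
-- ===== SOURCE A (Python) =====
-- def _get_token_ids(token_word_ids, span_word_id, offset=1):
--     """Retrieve token ids based on word ids.
--
--     Args:
--         token_word_ids: the list of word ids for token.
--         span_word_id: int. the word id in the original string.
--         offset: int. if the tokenized sequence is prepended with special token, this offset will be set to
--         the number of special tokens (for example, if [CLS] is added, then offset=1).
--
--     For example, the token word ids can be:
--      ['ir', 'an', 'Ġand', 'Ġaf', 'ghan', 'istan', 'Ġspeak', 'Ġthe', 'Ġsame', 'Ġlanguage', 'Ġ.']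
--     And the original sentence is "iran and afghanistan speak the same language ."
--     Suppose the span_word_id is 2 (afghanistan), then the token id is [3, 4, 5]
--     """
--     results = []
--     for ix, word_id in enumerate(token_word_ids):
--         if word_id == span_word_id:
--             results.append(ix + offset)
--         elif word_id > span_word_id:
--             break
--     return results
-- ===== SOURCE B (Python) =====
-- def _get_token_ids(token_word_ids, span_word_id, offset=1):
--     # Two-pass: find the break point first, then one comprehension over the prefix.
--     cut = next((i for i, w in enumerate(token_word_ids) if w > span_word_id),
--                len(token_word_ids))
--     return [i + offset for i, w in enumerate(token_word_ids[:cut]) if w == span_word_id]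
-- ===== Notes on version B (the rewrite author's own statement) =====
-- stated objective: idiomatic
-- what changed: A's single loop with append/break is replaced by a two-phase formulation: first locate the break point (first id greater than span_word_id) with next(...), then build the result with one comprehension over that prefix.
import Mathlib
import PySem

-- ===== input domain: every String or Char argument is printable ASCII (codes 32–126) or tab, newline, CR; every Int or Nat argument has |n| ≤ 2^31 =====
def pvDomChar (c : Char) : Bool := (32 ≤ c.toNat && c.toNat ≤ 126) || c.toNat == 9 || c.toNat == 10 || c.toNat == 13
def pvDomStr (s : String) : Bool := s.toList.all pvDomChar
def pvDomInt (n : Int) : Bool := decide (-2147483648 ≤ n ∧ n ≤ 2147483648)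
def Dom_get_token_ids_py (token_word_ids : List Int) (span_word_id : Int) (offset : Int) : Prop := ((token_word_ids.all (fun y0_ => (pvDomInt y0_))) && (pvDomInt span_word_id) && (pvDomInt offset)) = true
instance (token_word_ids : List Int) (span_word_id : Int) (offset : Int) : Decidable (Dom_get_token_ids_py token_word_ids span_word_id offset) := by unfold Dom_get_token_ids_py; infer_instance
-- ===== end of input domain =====

-- B replaces A's append/break loop by "find the break point, then one comprehension over the prefix" (idiomatic; same cost).

-- ===== PORT A =====
-- the for-loop with append/break, as structural recursion over the list with the running index
def pvLoopA (xs : List Int) (span_word_id offset ix : Int) : List Int :=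
  match xs with
  | [] => []
  | w :: rest =>
    if w = span_word_id then (ix + offset) :: pvLoopA rest span_word_id offset (ix + 1)
    else if span_word_id < w then []
    else pvLoopA rest span_word_id offset (ix + 1)

def get_token_ids_py (token_word_ids : List Int) (span_word_id : Int) (offset : Int) : List Int :=
  pvLoopA token_word_ids span_word_id offset 0

-- ===== PORT B =====
-- next((i for i, w in enumerate(xs) if w > span), len(xs))
def pvCut (xs : List Int) (span_word_id : Int) : Nat :=
  match xs with
  | [] => 0
  | w :: rest => if span_word_id < w then 0 else pvCut rest span_word_id + 1

def get_token_ids_py_alt (token_word_ids : List Int) (span_word_id : Int) (offset : Int) : List Int :=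
  (PySem.List.enumerate (token_word_ids.take (pvCut token_word_ids span_word_id)) 0).filterMap
    (fun p => if p.2 = span_word_id then some (p.1 + offset) else none)

-- ===== PRECONDITION & SPEC =====
def Spec_get_token_ids_py (token_word_ids : List Int) (span_word_id : Int) (offset : Int) (out : List Int) : Prop := out = get_token_ids_py_alt token_word_ids span_word_id offset
instance (token_word_ids : List Int) (span_word_id : Int) (offset : Int) (out : List Int) : Decidable (Spec_get_token_ids_py token_word_ids span_word_id offset out) := by unfold Spec_get_token_ids_py; infer_instance

-- ===== CLAIM (what is proved, stated in full; the proofs are below) =====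
def Claim_equal_get_token_ids_py : Prop := ∀ (token_word_ids : List Int) (span_word_id : Int) (offset : Int), Dom_get_token_ids_py token_word_ids span_word_id offset → Spec_get_token_ids_py token_word_ids span_word_id offset (get_token_ids_py token_word_ids span_word_id offset)

-- ===== LEMMAS AND PROOFS =====
theorem pvLoopA_eq (xs : List Int) (span offset : Int) :
    ∀ ix : Int, pvLoopA xs span offset ix =
      (PySem.List.enumerate (xs.take (pvCut xs span)) ix).filterMap
        (fun p => if p.2 = span then some (p.1 + offset) else none) := by
  induction xs with
  | nil => intro ix; simp [pvLoopA, pvCut, PySem.List.enumerate_nil]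
  | cons w rest ih =>
    intro ix
    by_cases hw : w = span
    · subst hw
      simp [pvLoopA, pvCut, PySem.List.enumerate_cons, ih]
    · by_cases hlt : span < w
      · simp [pvLoopA, pvCut, hw, hlt, PySem.List.enumerate_nil]
      · simp [pvLoopA, pvCut, hw, hlt, PySem.List.enumerate_cons, ih]

-- ===== VERDICT (by name: the statement is the Claim_ definition above) =====
theorem get_token_ids_py_spec : Claim_equal_get_token_ids_py := by
  intro xs span offset _
  unfold Spec_get_token_ids_py get_token_ids_py get_token_ids_py_alt
  exact pvLoopA_eq xs span offset 0
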